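-- pv_equiv track=rewrite | github.com/Goralsth/torch-semimarkov | benchmarks/practical_demonstration/timit/timit_metrics.py | collapse_to_segments
-- ===== SOURCE A (Python) =====
-- def collapse_to_segments(labels: list[int]) -> list[int]:
--     """Collapse frame-level labels to segment-level (remove consecutive duplicates)."""
--     if not labels:
--         return []
--
--     segments = [labels[0]]
--     for label in labels[1:]:
--         if label != segments[-1]:
--             segments.append(label)
--
--     return segments
-- ===== SOURCE B (Python) =====
-- def collapse_to_segments(labels: list[int]) -> list[int]:
--     """Collapse frame-level labels to segment-level (remove consecutive duplicates)."""
--     if len(labels) <= 1: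
--         return list(labels)
--     mid = len(labels) // 2
--     left = collapse_to_segments(labels[:mid])
--     right = collapse_to_segments(labels[mid:])
--     if left[-1] == right[0]:
--         return left + right[1:]
--     return left + right
-- ===== Notes on version B (the rewrite author's own statement) =====
-- stated objective: alternative
-- what changed: Replaces A's single left-to-right accumulator scan with a divide-and-conquer recursion: collapse each half independently and merge, dropping the head of the right half when it equals the last label of the left half.
import Mathlib
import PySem

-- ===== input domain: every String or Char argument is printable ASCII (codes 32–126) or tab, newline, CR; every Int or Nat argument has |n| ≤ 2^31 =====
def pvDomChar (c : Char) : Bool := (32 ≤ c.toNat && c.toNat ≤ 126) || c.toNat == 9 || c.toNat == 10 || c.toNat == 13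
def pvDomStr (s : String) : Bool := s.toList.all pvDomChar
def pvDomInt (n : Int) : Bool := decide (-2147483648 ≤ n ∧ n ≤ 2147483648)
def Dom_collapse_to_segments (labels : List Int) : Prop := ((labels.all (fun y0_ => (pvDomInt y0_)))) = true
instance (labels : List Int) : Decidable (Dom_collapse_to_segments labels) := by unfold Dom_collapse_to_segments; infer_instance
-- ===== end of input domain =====

-- B replaces A's left-to-right accumulator scan with a divide-and-conquer recursion
-- (collapse each half, then merge at the boundary); same result, different decomposition.
-- ===== PORT A =====
def collapse_to_segments (labels : List Int) : List Int :=
  match labels with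
  | [] => []
  | h :: t =>
      t.foldl (fun segments label =>
        if label ≠ segments.getLast! then segments ++ [label] else segments) [h]

-- ===== PORT B =====
-- port of B: split in half, collapse each half recursively, merge the two collapsed
-- halves (drop the head of the right half when it equals the last of the left half);
-- both halves are nonempty in the recursive case, so left[-1] / right[0] are total here
def collapse_to_segments_alt (labels : List Int) : List Int :=
  if _h : labels.length ≤ 1 then labels
  else
    let mid := labels.length / 2
    let left := collapse_to_segments_alt (labels.take mid)
    let right := collapse_to_segments_alt (labels.drop mid)
    if left.getLast! = right.head! then left ++ right.tail else left ++ right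
termination_by labels.length
decreasing_by
  · simp only [List.length_take]; omega
  · simp only [List.length_drop]; omega

-- ===== PRECONDITION & SPEC =====
def Spec_collapse_to_segments (labels : List Int) (out : List Int) : Prop := out = collapse_to_segments_alt labels
instance (labels : List Int) (out : List Int) : Decidable (Spec_collapse_to_segments labels out) := by unfold Spec_collapse_to_segments; infer_instance

-- ===== CLAIM (what is proved, stated in full; the proofs are below) =====
def Claim_equal_collapse_to_segments : Prop := ∀ (labels : List Int), Dom_collapse_to_segments labels → Spec_collapse_to_segments labels (collapse_to_segments labels)

-- ===== LEMMAS AND PROOFS =====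

-- canonical recursive collapse, the common reference point of both proofs
def pvCollapse : List Int → List Int
  | [] => []
  | [x] => [x]
  | x :: y :: t => if x = y then pvCollapse (y :: t) else x :: pvCollapse (y :: t)

theorem pvCollapse_head : ∀ (t : List Int) (x : Int), ∃ r, pvCollapse (x :: t) = x :: r := by
  intro t
  induction t with
  | nil => intro x; exact ⟨[], rfl⟩
  | cons y t ih =>
      intro x
      by_cases hxy : x = y
      · subst hxy
        obtain ⟨r, hr⟩ := ih x
        exact ⟨r, by rw [pvCollapse, if_pos rfl]; exact hr⟩
      · exact ⟨pvCollapse (y :: t), by rw [pvCollapse, if_neg hxy]⟩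

theorem pvCollapse_last : ∀ (t : List Int) (x : Int),
    (pvCollapse (x :: t)).getLast! = (x :: t).getLast! := by
  intro t
  induction t with
  | nil => intro x; rfl
  | cons y t ih =>
      intro x
      obtain ⟨r, hr⟩ := pvCollapse_head t y
      by_cases hxy : x = y
      · rw [pvCollapse, if_pos hxy, ih y]
        simp [List.getLast!_eq_getLast?_getD]
      · rw [pvCollapse, if_neg hxy]
        rw [show (x :: pvCollapse (y :: t)).getLast! = (pvCollapse (y :: t)).getLast! from by
          rw [hr]; simp [List.getLast!_eq_getLast?_getD]]
        rw [ih y]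
        simp [List.getLast!_eq_getLast?_getD]

-- the merge law: collapsing a concatenation = collapsing the pieces and joining at the seam
theorem pvCollapse_append : ∀ (xs ys : List Int), xs ≠ [] → ys ≠ [] →
    pvCollapse (xs ++ ys) =
      if xs.getLast! = ys.head! then pvCollapse xs ++ (pvCollapse ys).tail
      else pvCollapse xs ++ pvCollapse ys := by
  intro xs
  induction xs with
  | nil => intro ys h; exact absurd rfl h
  | cons a xs ih =>
      intro ys _ hys
      match xs, ys with
      | [], y :: ys' =>
          obtain ⟨r, hr⟩ := pvCollapse_head ys' y
          simp only [List.singleton_append, pvCollapse, hr]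
          by_cases hay : a = y
          · simp [hay]
          · simp [hay]
      | b :: xs', ys =>
          have hx : (a :: b :: xs').getLast! = (b :: xs').getLast! := by
            simp [List.getLast!_eq_getLast?_getD]
          have ihb := ih ys (by simp) hys
          simp only [List.cons_append] at ihb ⊢
          simp only [pvCollapse]
          rw [ihb, hx]
          by_cases hab : a = b
          · simp [hab]
          · simp only [hab, if_false]
            split_ifs <;> simp

theorem alt_len_eq : ∀ (n : ℕ) (labels : List Int), labels.length ≤ n →
    collapse_to_segments_alt labels = pvCollapse labels := by
  intro n
  induction n with
  | zero =>
      intro labels h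
      have : labels = [] := List.eq_nil_of_length_eq_zero (Nat.le_zero.mp h)
      subst this
      rw [collapse_to_segments_alt]
      rfl
  | succ n ih =>
      intro labels hlen
      by_cases h : labels.length ≤ 1
      · rw [collapse_to_segments_alt, dif_pos h]
        match labels, h with
        | [], _ => rfl
        | [x], _ => rfl
      · rw [collapse_to_segments_alt, dif_neg h]
        simp only
        rw [ih (labels.take (labels.length / 2))
              (by simp only [List.length_take]; omega),
            ih (labels.drop (labels.length / 2))
              (by simp only [List.length_drop]; omega)]
        have htake : labels.take (labels.length / 2) ≠ [] :=
          List.ne_nil_of_length_pos (by simp only [List.length_take]; omega)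
        have hdrop : labels.drop (labels.length / 2) ≠ [] :=
          List.ne_nil_of_length_pos (by simp only [List.length_drop]; omega)
        have hj := pvCollapse_append (labels.take (labels.length / 2))
          (labels.drop (labels.length / 2)) htake hdrop
        rw [List.take_append_drop] at hj
        rw [hj]
        -- align the seam test: pvCollapse preserves head and last
        obtain ⟨x, tx, hxe⟩ := List.exists_cons_of_ne_nil htake
        obtain ⟨y, ty, hye⟩ := List.exists_cons_of_ne_nil hdrop
        rw [hxe, hye, pvCollapse_last tx x]
        obtain ⟨r, hr⟩ := pvCollapse_head ty y
        rw [hr]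
        rfl

theorem alt_eq_pvCollapse (labels : List Int) :
    collapse_to_segments_alt labels = pvCollapse labels :=
  alt_len_eq labels.length labels (le_refl _)

-- A side: the collapsed tail of the fold, given the previously emitted label a
def pvRest (a : Int) : List Int → List Int
  | [] => []
  | x :: xs => if x = a then pvRest a xs else x :: pvRest x xs

theorem pvGetLast!_concat (l : List Int) (x : Int) : (l ++ [x]).getLast! = x := by
  simp [List.getLast!_eq_getLast?_getD, List.getLast?_append]

theorem pvFold_eq_rest : ∀ (t segs : List Int) (a : Int), segs.getLast! = a →
    t.foldl (fun segments label =>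
      if label ≠ segments.getLast! then segments ++ [label] else segments) segs
      = segs ++ pvRest a t := by
  intro t
  induction t with
  | nil => intro segs a _; simp [pvRest]
  | cons x xs ih =>
      intro segs a hl
      by_cases hx : x = a
      · subst hx
        simp only [List.foldl_cons, hl, ne_eq, not_true_eq_false, if_false]
        rw [ih segs _ hl, pvRest, if_pos rfl]
      · simp only [List.foldl_cons]
        rw [if_pos (by rw [hl]; exact hx)]
        rw [ih (segs ++ [x]) x (pvGetLast!_concat segs x)]
        rw [pvRest, if_neg hx]
        simp

theorem pvCollapse_cons_rest : ∀ (t : List Int) (a : Int),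
    pvCollapse (a :: t) = a :: pvRest a t := by
  intro t
  induction t with
  | nil => intro a; rfl
  | cons x xs ih =>
      intro a
      by_cases hax : a = x
      · rw [pvCollapse, if_pos hax, ih x, pvRest, if_pos hax.symm, hax]
      · rw [pvCollapse, if_neg hax, ih x, pvRest,
          if_neg (fun h => hax h.symm)]

-- ===== VERDICT (by name: the statement is the Claim_ definition above) =====
theorem collapse_to_segments_spec : Claim_equal_collapse_to_segments := by
  intro labels _
  unfold Spec_collapse_to_segments
  rw [alt_eq_pvCollapse]
  match labels with
  | [] => rfl
  | h :: t =>
      rw [collapse_to_segments]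
      rw [pvFold_eq_rest t [h] h (by simp [List.getLast!_eq_getLast?_getD])]
      rw [pvCollapse_cons_rest]
      rfl
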